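-- pv_equiv track=rewrite | github.com/psarangi550/Interview_Solve_cases | todays_practise_result/power_of_2.py | foo
-- ===== SOURCE A (Python) =====
-- def foo(num):
--     temp=num
--     result=True
--     rev_num=0
--     while temp>0:
--         if temp%2==0:
--             rev_num+=1
--         else:
--             if num!=1:
--                 result=False
--             else:
--                 result=True
--             break
--         temp=temp//2
--     if rev_num:
--         return True
--     else:
--         return result
-- ===== SOURCE B (Python) =====
-- def foo(num):
--     return num <= 1 or num % 2 == 0
-- ===== Notes on version B (the rewrite author's own statement) =====
-- stated objective: simpler
-- what changed: Replaced the halving while-loop and its rev_num/result bookkeeping with a single closed-form boolean: True iff num <= 1 or num is even.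
import Mathlib
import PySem

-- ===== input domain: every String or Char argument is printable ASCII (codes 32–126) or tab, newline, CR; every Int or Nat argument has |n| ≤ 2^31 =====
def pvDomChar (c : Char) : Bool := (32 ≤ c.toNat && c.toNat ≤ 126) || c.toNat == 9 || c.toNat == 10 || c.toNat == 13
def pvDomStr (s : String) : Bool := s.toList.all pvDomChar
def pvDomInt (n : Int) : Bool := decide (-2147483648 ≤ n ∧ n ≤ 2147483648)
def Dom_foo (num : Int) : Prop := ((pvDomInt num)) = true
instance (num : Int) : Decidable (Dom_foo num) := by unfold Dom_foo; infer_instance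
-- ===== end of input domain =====

-- B replaces A's halving while-loop with a closed-form boolean (simpler): True iff num ≤ 1 or num is even.


-- ===== PORT A =====
-- the while loop of A: state (temp, rev_num, result); returns final (rev_num, result)
def fooLoop (num temp rev_num : Int) (result : Bool) : Int × Bool :=
  if h : temp > 0 then
    if PySem.Int.mod temp 2 == 0 then
      fooLoop num (PySem.Int.floordiv temp 2) (rev_num + 1) result
    else
      (rev_num, if num ≠ 1 then false else true)
  else (rev_num, result)
termination_by temp.toNat
decreasing_by
  have he : PySem.Int.floordiv temp 2 = temp / 2 := by
    simp [PySem.Int.floordiv, Int.fdiv_eq_ediv]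
  rw [he]; omega

def foo (num : Int) : Bool :=
  let st := fooLoop num num 0 true
  if st.1 ≠ 0 then true else st.2

-- ===== PORT B =====
def foo_alt (num : Int) : Bool := num ≤ 1 || PySem.Int.mod num 2 == 0

-- ===== PRECONDITION & SPEC =====
def Spec_foo (num : Int) (out : Bool) : Prop := out = foo_alt num
instance (num : Int) (out : Bool) : Decidable (Spec_foo num out) := by unfold Spec_foo; infer_instance

-- ===== CLAIM (what is proved, stated in full; the proofs are below) =====
def Claim_equal_foo : Prop := ∀ (num : Int), Dom_foo num → Spec_foo num (foo num)

-- ===== LEMMAS AND PROOFS =====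

-- rev_num never decreases through the loop
theorem fooLoop_fst_ge (num temp rev_num : Int) (result : Bool) :
    rev_num ≤ (fooLoop num temp rev_num result).1 := by
  fun_induction fooLoop num temp rev_num result with
  | case1 temp rev h he ih => omega
  | case2 temp rev h he => simp
  | case3 rev r h => simp

theorem foo_spec : Claim_equal_foo := by
  unfold Claim_equal_foo
  intro num _
  unfold Spec_foo foo foo_alt
  by_cases hle : num ≤ 0
  · -- num ≤ 0 : loop does not run
    have h0 : ¬ num > 0 := by omega
    have h1 : num ≤ 1 := by omega
    rw [fooLoop]
    simp [h0, h1]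
  · have hpos : num > 0 := by omega
    rcases Int.even_or_odd num with ⟨k, hk⟩ | ⟨k, hk⟩
    · -- even (hence > 1): first iteration increments rev_num, so the result is True
      have hm : PySem.Int.mod num 2 = 0 := by
        simp [PySem.Int.mod, Int.fmod_eq_emod]; omega
      rw [fooLoop]
      simp only [hpos, dite_true, hm, beq_self_eq_true, if_true]
      have hfd : PySem.Int.floordiv num 2 = num / 2 := by
        simp [PySem.Int.floordiv, Int.fdiv_eq_ediv]
      have hge := fooLoop_fst_ge num (PySem.Int.floordiv num 2) (0 + 1) true
      rw [hfd] at hge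
      norm_num at hge
      simp
      left
      omega
    · -- odd: loop breaks on the first iteration; result is (num == 1)
      have hm : PySem.Int.mod num 2 = 1 := by
        simp [PySem.Int.mod, Int.fmod_eq_emod]; omega
      rw [fooLoop]
      simp only [hpos, dite_true, hm]
      by_cases h1 : num = 1
      · simp [h1]
      · have hgt : ¬ num ≤ 1 := by omega
        simp [h1, hgt]
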